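-- pv_equiv track=rewrite | github.com/Vyxal/Vyxal | vyxal/helpers.py | wrap_with_width
-- ===== SOURCE A (Python) =====
-- from typing import Any, Iterable, List, Optional, Union
--
-- def wrap_with_width(vector: Union[str, list], width: int) -> list[Any]:
--     """A version of textwrap.wrap that plays nice with spaces"""
--     ret: list[Union[str, list]] = []
--     temp = []
--     for item in vector:
--         temp.append(item)
--         if len(temp) == width:
--             if all(type(x) is str for x in temp):
--                 ret.append("".join(temp))
--             else:
--                 ret.append(temp[::])
--             temp = []
--     if len(temp) < width and temp:
--         if all(type(x) is str for x in temp):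
--             ret.append("".join(temp))
--         else:
--             ret.append(temp[::])
--
--     return ret
-- ===== SOURCE B (Python) =====
-- def wrap_with_width(vector, width):
--     """A version of textwrap.wrap that plays nice with spaces"""
--     if width <= 0:
--         return []
--     ret = []
--     for i in range(0, len(vector), width):
--         chunk = vector[i : i + width]
--         if type(chunk) is str:
--             ret.append(chunk)
--         elif all(type(x) is str for x in chunk):
--             ret.append("".join(chunk))
--         else:
--             ret.append(list(chunk))
--     return ret
-- ===== Notes on version B (the rewrite author's own statement) =====
-- stated objective: faster
-- what changed: B replaces A's element-by-element accumulation into a temp buffer with a counter and a duplicated tail-flush block by direct slicing at stride width (range(0, len(vector), width)), with a width<=0 guard where range would raise; bulk slicing avoids per-item appends and joins.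
import Mathlib
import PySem

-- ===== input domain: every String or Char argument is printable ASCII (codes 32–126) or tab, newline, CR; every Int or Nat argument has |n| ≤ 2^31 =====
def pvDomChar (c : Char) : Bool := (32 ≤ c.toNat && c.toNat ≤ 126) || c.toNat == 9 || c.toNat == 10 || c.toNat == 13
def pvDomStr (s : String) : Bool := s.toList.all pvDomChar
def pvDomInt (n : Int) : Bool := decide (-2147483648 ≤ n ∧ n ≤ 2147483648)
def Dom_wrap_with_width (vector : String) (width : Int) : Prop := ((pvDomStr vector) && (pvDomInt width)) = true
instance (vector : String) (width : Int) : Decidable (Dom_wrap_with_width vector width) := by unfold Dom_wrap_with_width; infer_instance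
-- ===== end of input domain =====

-- B chunks by slicing at stride width instead of A's temp-buffer-with-counter accumulation
-- with its duplicated tail-flush block (timing run measured B faster); return values proved equal.

-- ===== PORT A =====
-- For a String input every item is a 1-character str, so Python's
-- `all(type(x) is str for x in temp)` is True and `"".join(temp)` of the accumulated
-- characters is String.ofList temp.
def wrap_with_width (vector : String) (width : Int) : List String :=
  let st := vector.toList.foldl
    (fun (st : List String × List Char) (item : Char) =>
      let temp := st.2 ++ [item]
      if (temp.length : Int) = width then (st.1 ++ [String.ofList temp], ([] : List Char))
      else (st.1, temp)) ([], [])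
  if (st.2.length : Int) < width ∧ st.2 ≠ [] then st.1 ++ [String.ofList st.2] else st.1

-- ===== PORT B =====
-- chunk = vector[i:i+width] is already a str and is appended directly (Source B's first branch);
-- the slice is ported on the character list, which is exact.
def wrap_with_width_alt (vector : String) (width : Int) : List String :=
  if width ≤ 0 then []
  else (PySem.List.pyRange 0 (PySem.Str.len vector) width).map
    (fun i => String.ofList (PySem.List.slice vector.toList (some i) (some (i + width))))

-- ===== PRECONDITION & SPEC =====
def Spec_wrap_with_width (vector : String) (width : Int) (out : List String) : Prop := out = wrap_with_width_alt vector width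
instance (vector : String) (width : Int) (out : List String) : Decidable (Spec_wrap_with_width vector width out) := by unfold Spec_wrap_with_width; infer_instance

-- ===== CLAIM (what is proved, stated in full; the proofs are below) =====
def Claim_equal_wrap_with_width : Prop := ∀ (vector : String) (width : Int), Dom_wrap_with_width vector width → Spec_wrap_with_width vector width (wrap_with_width vector width)

-- ===== LEMMAS AND PROOFS =====

-- proof-only helpers: A's loop body as a named function, and the common chunking
def stepA (width : Int) (st : List String × List Char) (item : Char) : List String × List Char :=
  let temp := st.2 ++ [item]
  if (temp.length : Int) = width then (st.1 ++ [String.ofList temp], ([] : List Char))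
  else (st.1, temp)

def chunksC (w : Nat) (l : List Char) : List (List Char) :=
  if h : w = 0 ∨ l = [] then [] else l.take w :: chunksC w (l.drop w)
termination_by l.length
decreasing_by
  simp only [not_or] at h
  have hl : 0 < l.length := List.length_pos_iff.mpr h.2
  simp only [List.length_drop]
  omega

lemma chunksC_nil (w : Nat) : chunksC w [] = [] := by
  unfold chunksC; simp

lemma chunksC_cons (w : Nat) (hw : 0 < w) (l : List Char) (hl : l ≠ []) :
    chunksC w l = l.take w :: chunksC w (l.drop w) := by
  rw [chunksC]; simp [hl, Nat.pos_iff_ne_zero.mp hw]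

lemma stepA_flush (width : Int) (ret : List String) (temp : List Char) (x : Char)
    (hlen : (((temp ++ [x]).length : Nat) : Int) = width) :
    stepA width (ret, temp) x = (ret ++ [String.ofList (temp ++ [x])], []) := by
  simp only [stepA]
  rw [if_pos hlen]

lemma stepA_keep (width : Int) (ret : List String) (temp : List Char) (x : Char)
    (hlen : (((temp ++ [x]).length : Nat) : Int) ≠ width) :
    stepA width (ret, temp) x = (ret, temp ++ [x]) := by
  simp only [stepA]
  rw [if_neg hlen]

-- A's loop + tail flush computes the chunks of temp ++ l
lemma foldA (width : Int) (hw : 1 ≤ width) :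
    ∀ (l : List Char) (ret : List String) (temp : List Char), (temp.length : Int) < width →
    (if ((l.foldl (stepA width) (ret, temp)).2.length : Int) < width ∧
        (l.foldl (stepA width) (ret, temp)).2 ≠ []
     then (l.foldl (stepA width) (ret, temp)).1 ++
            [String.ofList (l.foldl (stepA width) (ret, temp)).2]
     else (l.foldl (stepA width) (ret, temp)).1)
    = ret ++ (chunksC width.toNat (temp ++ l)).map String.ofList := by
  intro l
  induction l with
  | nil =>
    intro ret temp htemp
    simp only [List.foldl_nil, List.append_nil]
    by_cases he : temp = []
    · subst he
      simp [chunksC_nil]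
    · rw [if_pos ⟨htemp, he⟩]
      rw [chunksC_cons width.toNat (by omega) temp he,
          List.drop_eq_nil_of_le (by omega : temp.length ≤ width.toNat),
          List.take_of_length_le (by omega : temp.length ≤ width.toNat), chunksC_nil]
      simp
  | cons x xs ih =>
    intro ret temp htemp
    simp only [List.foldl_cons]
    by_cases hlen : (((temp ++ [x]).length : Nat) : Int) = width
    · rw [stepA_flush width ret temp x hlen]
      have hih := ih (ret ++ [String.ofList (temp ++ [x])]) []
        (by simp only [List.length_nil, Nat.cast_zero]; omega)
      simp only [List.nil_append] at hih
      rw [hih]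
      have hne : (temp ++ [x]) ++ xs ≠ [] := by
        intro hc
        have := congrArg List.length hc
        simp at this
      have hlenN : (temp ++ [x]).length = width.toNat := by omega
      rw [show temp ++ x :: xs = (temp ++ [x]) ++ xs by simp,
          chunksC_cons width.toNat (by omega) _ hne, List.take_left' hlenN,
          List.drop_left' hlenN]
      simp
    · rw [stepA_keep width ret temp x hlen]
      have hlt : (((temp ++ [x]).length : Nat) : Int) < width := by
        simp only [List.length_append, List.length_cons, List.length_nil] at *
        push_cast at *
        omega
      rw [ih ret (temp ++ [x]) hlt]
      simp

-- range with positive step peels its first element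
lemma pyRange_pos_cons (a b s : Int) (hs : 0 < s) (hab : a < b) :
    PySem.List.pyRange a b s = a :: PySem.List.pyRange (a + s) b s := by
  rw [PySem.List.pyRange_of_pos _ _ hs, PySem.List.pyRange_of_pos _ _ hs, if_pos hab]
  have hq0 : 0 ≤ (b - a - 1) / s := Int.ediv_nonneg (by omega) (by omega)
  have hdiv : (b - a + s - 1) / s = (b - a - 1) / s + 1 := by
    rw [show b - a + s - 1 = (b - a - 1) + 1 * s by ring,
        Int.add_mul_ediv_right _ _ (by omega : s ≠ 0)]
  by_cases h2 : a + s < b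
  · rw [if_pos h2, show b - (a + s) + s - 1 = b - a - 1 by ring,
        show ((b - a + s - 1) / s).toNat = ((b - a - 1) / s).toNat + 1 by rw [hdiv]; omega,
        List.range_succ_eq_map]
    simp only [List.map_cons, List.map_map, Nat.cast_zero, mul_zero, add_zero]
    congr 1
    apply List.map_congr_left
    intro k _
    simp only [Function.comp_apply]
    push_cast
    ring
  · rw [if_neg h2]
    have hz : (b - a - 1) / s = 0 := Int.ediv_eq_zero_of_lt (by omega) (by omega)
    rw [show ((b - a + s - 1) / s).toNat = 1 by rw [hdiv, hz]; rfl]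
    simp

-- the k-th strided slice of l is the k-th slice of l with the first w elements dropped
lemma slice_shift (w : Nat) (l : List Char) (k : Nat) :
    PySem.List.slice l (some ((w : Int) + (w : Int) * k)) (some ((w : Int) + (w : Int) * k + w))
    = PySem.List.slice (l.drop w) (some ((0 : Int) + (w : Int) * k)) (some ((0 : Int) + (w : Int) * k + w)) := by
  rw [show (w : Int) + (w : Int) * k = ((w + w * k : Nat) : Int) by push_cast; ring,
      show ((w + w * k : Nat) : Int) + w = ((w + w * k + w : Nat) : Int) by push_cast; ring,
      show (0 : Int) + (w : Int) * k = ((w * k : Nat) : Int) by push_cast; ring,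
      show ((w * k : Nat) : Int) + w = ((w * k + w : Nat) : Int) by push_cast; ring,
      PySem.List.slice_natCast, PySem.List.slice_natCast, List.drop_drop]
  congr 1; omega

-- shifting B's strided range onto the dropped list
lemma shiftB (w : Nat) (hw : 1 ≤ w) (l : List Char) :
    (PySem.List.pyRange (w : Int) (l.length : Int) (w : Int)).map
      (fun i => String.ofList (PySem.List.slice l (some i) (some (i + (w : Int)))))
    = (PySem.List.pyRange 0 ((l.drop w).length : Int) (w : Int)).map
      (fun i => String.ofList (PySem.List.slice (l.drop w) (some i) (some (i + (w : Int))))) := by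
  have hs : (0 : Int) < (w : Int) := by omega
  rw [PySem.List.pyRange_of_pos _ _ hs, PySem.List.pyRange_of_pos _ _ hs]
  by_cases hlt : (w : Int) < (l.length : Int)
  · have hlt' : w < l.length := by exact_mod_cast hlt
    have hdl : ((l.drop w).length : Int) = (l.length : Int) - w := by
      simp only [List.length_drop]; omega
    rw [if_pos hlt, if_pos (by omega), hdl,
        show (l.length : Int) - w - 0 + w - 1 = (l.length : Int) - w + w - 1 by ring,
        List.map_map, List.map_map]
    apply List.map_congr_left
    intro k _
    simp only [Function.comp_apply]
    rw [slice_shift w l k]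
  · rw [if_neg hlt, if_neg (by simp only [List.length_drop]; omega)]
    simp

-- B's slicing over the strided range computes the same chunks
lemma Balt (w : Nat) (hw : 1 ≤ w) :
    ∀ (n : Nat) (l : List Char), l.length ≤ n →
    (PySem.List.pyRange 0 (l.length : Int) (w : Int)).map
      (fun i => String.ofList (PySem.List.slice l (some i) (some (i + (w : Int)))))
    = (chunksC w l).map String.ofList := by
  intro n
  induction n with
  | zero =>
    intro l hl
    have : l = [] := List.eq_nil_of_length_eq_zero (by omega)
    subst this
    rw [PySem.List.pyRange_of_pos _ _ (by omega : (0:Int) < (w:Int))]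
    simp [chunksC_nil]
  | succ n ih =>
    intro l hl
    by_cases hnil : l = []
    · subst hnil
      rw [PySem.List.pyRange_of_pos _ _ (by omega : (0:Int) < (w:Int))]
      simp [chunksC_nil]
    · have hL : 0 < l.length := List.length_pos_iff.mpr hnil
      rw [pyRange_pos_cons 0 (l.length : Int) (w : Int) (by omega) (by exact_mod_cast hL),
          List.map_cons, chunksC_cons w hw l hnil, List.map_cons, zero_add]
      congr 1
      · rw [PySem.List.slice_zero_start, PySem.List.slice_to_natCast]
      · rw [shiftB w hw l]
        exact ih (l.drop w) (by simp only [List.length_drop]; omega)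

-- with non-positive width A's loop never flushes
lemma foldA_nonpos (width : Int) (hw : width ≤ 0) :
    ∀ (l : List Char) (ret : List String) (temp : List Char),
    l.foldl
      (fun (st : List String × List Char) (item : Char) =>
        let temp := st.2 ++ [item]
        if (temp.length : Int) = width then (st.1 ++ [String.ofList temp], ([] : List Char))
        else (st.1, temp)) (ret, temp) = (ret, temp ++ l) := by
  intro l
  induction l with
  | nil => intro ret temp; simp
  | cons x xs ih =>
    intro ret temp
    simp only [List.foldl_cons]
    have hne : ¬ (((temp ++ [x]).length : Int) = width) := by
      simp only [List.length_append, List.length_cons, List.length_nil]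
      push_cast; omega
    simp only [hne, if_false]
    rw [ih]
    simp

-- ===== VERDICT (by name: the statement is the Claim_ definition above) =====
theorem wrap_with_width_spec : Claim_equal_wrap_with_width := by
  intro vector width _
  unfold Spec_wrap_with_width wrap_with_width wrap_with_width_alt
  by_cases hw : width ≤ 0
  · conv_rhs => rw [if_pos hw]
    simp only
    rw [foldA_nonpos width hw]
    simp only [List.nil_append]
    rw [if_neg]
    rintro ⟨h1, -⟩
    omega
  · have hw' : 1 ≤ width := by omega
    conv_rhs => rw [if_neg hw]
    have hA := foldA width hw' vector.toList [] []
      (by simp only [List.length_nil, Nat.cast_zero]; omega)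
    simp only [List.nil_append] at hA
    have hw1 : 1 ≤ width.toNat := by omega
    have hB := Balt width.toNat hw1 vector.toList.length vector.toList (le_refl _)
    have hcast : width = (width.toNat : Int) := by omega
    conv_rhs => rw [hcast]
    rw [PySem.Str.len_eq]
    exact hA.trans hB.symm
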